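-- pv_equiv track=rewrite | github.com/NeuralDarsh/AI-Learning-Journey | GitHub_Streak_Analyzer.py | analyze_streak
-- ===== SOURCE A (Python) =====
-- def analyze_streak(commit_data):
--     total_commits = sum(commit_data)
--     days_active = len([d for d in commit_data if d > 0])
--
--     # Logic to find the longest consecutive streak of non-zero days
--     max_streak = 0
--     current_streak = 0
--
--     for day in commit_data:
--         if day > 0:
--             current_streak += 1
--             max_streak = max(max_streak, current_streak)
--         else:
--             current_streak = 0
--
--     return total_commits, days_active, max_streak
-- ===== SOURCE B (Python) =====
-- from itertools import groupby
--
-- def analyze_streak(commit_data):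
--     total_commits = sum(commit_data)
--     days_active = len([d for d in commit_data if d > 0])
--     runs = [len(list(g)) for k, g in groupby(commit_data, key=lambda x: x > 0) if k]
--     max_streak = max(runs, default=0)
--     return total_commits, days_active, max_streak
-- ===== Notes on version B (the rewrite author's own statement) =====
-- stated objective: idiomatic
-- what changed: The longest-streak pass replaces the incremental current/max counter loop with itertools.groupby run-length grouping reduced by max(..., default=0); sum and the positive-day comprehension are kept.
import Mathlib
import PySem

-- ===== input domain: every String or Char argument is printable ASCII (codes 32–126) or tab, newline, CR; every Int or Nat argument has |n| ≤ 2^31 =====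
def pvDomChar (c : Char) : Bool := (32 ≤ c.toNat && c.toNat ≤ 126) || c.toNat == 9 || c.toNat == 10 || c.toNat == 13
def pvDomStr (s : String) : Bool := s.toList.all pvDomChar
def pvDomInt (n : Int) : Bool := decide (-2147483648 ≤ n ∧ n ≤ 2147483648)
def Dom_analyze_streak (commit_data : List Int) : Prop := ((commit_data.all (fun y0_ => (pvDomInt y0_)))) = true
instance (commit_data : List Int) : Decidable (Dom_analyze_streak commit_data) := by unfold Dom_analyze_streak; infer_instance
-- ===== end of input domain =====

-- B replaces A's incremental current/max streak counter with run-length grouping (groupby) reduced by max; idiomatic, same cost.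

-- ===== PORT A =====
def analyze_streak (commit_data : List Int) : Int × Int × Int :=
  let total_commits : Int := commit_data.foldl (· + ·) 0
  let days_active : Int := ((commit_data.filter (fun d => decide (d > 0))).length : Int)
  -- loop with (max_streak, current_streak) state
  let st : Int × Int := commit_data.foldl
    (fun (p : Int × Int) day =>
      if day > 0 then (max p.1 (p.2 + 1), p.2 + 1) else (p.1, 0))
    (0, 0)
  (total_commits, days_active, st.1)

-- ===== PORT B =====
-- itertools.groupby by (x > 0), kept only the True groups' lengths
def pvPos (x : Int) : Bool := decide (x > 0)

def posRuns : List Int → List Int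
  | [] => []
  | d :: rest =>
    if pvPos d then
      (((rest.takeWhile pvPos).length : Int) + 1) :: posRuns (rest.dropWhile pvPos)
    else posRuns rest
termination_by l => l.length
decreasing_by
  · have := List.length_dropWhile_le pvPos rest
    simpa using Nat.lt_succ_of_le this
  · simp

def analyze_streak_alt (commit_data : List Int) : Int × Int × Int :=
  let total_commits : Int := commit_data.foldl (· + ·) 0
  let days_active : Int := ((commit_data.filter (fun d => decide (d > 0))).length : Int)
  let runs : List Int := posRuns commit_data
  let max_streak : Int := runs.foldl max 0
  (total_commits, days_active, max_streak)

-- ===== PRECONDITION & SPEC =====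
def Spec_analyze_streak (commit_data : List Int) (out : Int × Int × Int) : Prop := out = analyze_streak_alt commit_data
instance (commit_data : List Int) (out : Int × Int × Int) : Decidable (Spec_analyze_streak commit_data out) := by unfold Spec_analyze_streak; infer_instance

-- ===== CLAIM (what is proved, stated in full; the proofs are below) =====
def Claim_equal_analyze_streak : Prop := ∀ (commit_data : List Int), Dom_analyze_streak commit_data → Spec_analyze_streak commit_data (analyze_streak commit_data)

-- ===== LEMMAS AND PROOFS =====
def pvStepA (p : Int × Int) (day : Int) : Int × Int :=
  if day > 0 then (max p.1 (p.2 + 1), p.2 + 1) else (p.1, 0)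

-- crossing a maximal positive prefix: the max is bumped once by the prefix length, current resets
theorem pvFold_prefix (t : List Int) (ms cs : Int) (h0 : 0 ≤ cs) (hle : cs ≤ ms) :
    (t.foldl pvStepA (ms, cs)).1
      = ((t.dropWhile pvPos).foldl pvStepA
          (max ms (cs + ((t.takeWhile pvPos).length : Int)), 0)).1 := by
  induction t generalizing ms cs with
  | nil =>
    simp [List.foldl]
    omega
  | cons d rest ih =>
    by_cases hd : d > 0
    · have hpos : pvPos d = true := by simp [pvPos, hd]
      rw [List.takeWhile_cons_of_pos hpos, List.dropWhile_cons_of_pos hpos]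
      have hstep : pvStepA (ms, cs) d = (max ms (cs + 1), cs + 1) := by
        simp [pvStepA, hd]
      rw [List.foldl_cons, hstep]
      rw [ih (max ms (cs + 1)) (cs + 1) (by omega) (by omega)]
      suffices hs : max (max ms (cs + 1)) ((cs + 1) + ((rest.takeWhile pvPos).length : Int))
          = max ms (cs + (((d :: rest.takeWhile pvPos).length : Nat) : Int)) by rw [hs]
      simp only [List.length_cons]
      push_cast
      omega
    · have hneg : pvPos d = false := by simp [pvPos, hd]
      rw [List.takeWhile_cons_of_neg (by simp [hneg]), List.dropWhile_cons_of_neg (by simp [hneg])]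
      simp only [List.length_nil, Nat.cast_zero, add_zero]
      have hms : max ms cs = ms := by omega
      rw [hms, List.foldl_cons, List.foldl_cons]
      have hstep : pvStepA (ms, cs) d = (ms, 0) := by simp [pvStepA, hd]
      have hstep2 : pvStepA (ms, 0) d = (ms, 0) := by simp [pvStepA, hd]
      rw [hstep, hstep2]

theorem pvFold_eq_runs (xs : List Int) : ∀ (ms : Int), 0 ≤ ms →
    (xs.foldl pvStepA (ms, 0)).1 = (posRuns xs).foldl max ms := by
  induction xs using posRuns.induct with
  | case1 => intro ms _; simp [posRuns]
  | case2 d rest hpos ih =>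
    intro ms hms
    have hd : d > 0 := by simpa [pvPos] using hpos
    have hstep : pvStepA (ms, 0) d = (max ms 1, 1) := by simp [pvStepA, hd]
    rw [List.foldl_cons, hstep]
    rw [pvFold_prefix rest (max ms 1) 1 (by omega) (by omega)]
    rw [ih _ (by omega)]
    rw [posRuns]
    simp only [hpos, if_pos]
    rw [List.foldl_cons]
    suffices hs : max (max ms 1) (1 + ((rest.takeWhile pvPos).length : Int))
        = max ms (((rest.takeWhile pvPos).length : Int) + 1) by rw [hs]
    omega
  | case3 d rest hpos ih =>
    intro ms hms
    have hd : ¬ d > 0 := by simpa [pvPos] using hpos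
    have hstep : pvStepA (ms, 0) d = (ms, 0) := by simp [pvStepA, hd]
    rw [List.foldl_cons, hstep, ih ms hms, posRuns]
    simp [hpos]

-- ===== VERDICT (by name: the statement is the Claim_ definition above) =====
theorem analyze_streak_spec : Claim_equal_analyze_streak := by
  intro xs _
  unfold Spec_analyze_streak analyze_streak analyze_streak_alt
  have hfun : (fun (p : Int × Int) day =>
      if day > 0 then (max p.1 (p.2 + 1), p.2 + 1) else (p.1, (0:Int))) = pvStepA := by
    funext p d; rfl
  have h := pvFold_eq_runs xs 0 le_rfl
  simp only [hfun, h]
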